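-- pv_equiv track=rewrite | github.com/AndreaBe99/community-deception-thesis | src/community_algs/baselines/random_hiding.py | get_community_target_idx
-- ===== SOURCE A (Python) =====
-- from typing import List
--
-- def get_community_target_idx(
--
--     community_structure: List[List[int]],
--     community_target: List[int]) -> int:
--     """
--     Returns the index of the target community in the list of communities.
--     As the target community after a rewiring action we consider the community
--     with the highest number of nodes equal to the initial community.
--
--     Parameters
--     ----------
--     community_structure : List[List[int]]
--         List of communities
--     community_target : List[int]
--         Community of node we want to remove from it
--
--     Returns
--     -------
--     max_list_idx : int
--         Index of the target community in the list of communities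
--     """
--     max_count = 0
--     max_list_idx = 0
--     for i, lst in enumerate(community_structure):
--         count = sum(1 for x in lst if x in community_target)
--         if count > max_count:
--             max_count = count
--             max_list_idx = i
--     return max_list_idx
-- ===== SOURCE B (Python) =====
-- def get_community_target_idx(community_structure, community_target):
--     # inverted index: node -> list of community indices, one per occurrence
--     posting = {}
--     for i, lst in enumerate(community_structure):
--         for x in lst:
--             posting.setdefault(x, []).append(i)
--     # count overlaps by scanning the distinct target nodes against the index
--     counts = {}
--     for node in set(community_target):
--         for i in posting.get(node, []):
--             counts[i] = counts.get(i, 0) + 1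
--     if not counts:
--         return 0
--     best = max(counts.values())
--     return min(i for i, c in counts.items() if c == best)
-- ===== Notes on version B (the rewrite author's own statement) =====
-- stated objective: faster
-- what changed: Replaces A's per-community membership scans and running argmax by an inverted index (node -> posting list of community indices) that is queried once per distinct target node to fill a counter dict, after which the answer is read off as the smallest key attaining the maximal count (0 when the counter is empty).
import Mathlib
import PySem

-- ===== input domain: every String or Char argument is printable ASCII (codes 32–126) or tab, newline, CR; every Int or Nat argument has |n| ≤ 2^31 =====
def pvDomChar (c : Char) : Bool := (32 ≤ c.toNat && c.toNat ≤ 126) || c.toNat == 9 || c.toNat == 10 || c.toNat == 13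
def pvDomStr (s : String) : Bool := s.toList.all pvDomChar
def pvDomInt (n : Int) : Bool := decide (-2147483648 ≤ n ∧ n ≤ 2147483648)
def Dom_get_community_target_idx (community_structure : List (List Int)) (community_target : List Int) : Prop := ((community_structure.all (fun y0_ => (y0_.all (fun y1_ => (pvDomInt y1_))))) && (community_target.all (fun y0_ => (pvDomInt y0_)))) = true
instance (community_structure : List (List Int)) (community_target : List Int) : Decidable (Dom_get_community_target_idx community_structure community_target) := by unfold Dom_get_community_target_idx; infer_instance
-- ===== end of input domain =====

-- B replaces A's per-community membership scans and running argmax by an inverted index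
-- (node -> posting list of community indices) queried once per distinct target node to fill a
-- counter dict; the answer is the smallest key with maximal count (0 when the counter is empty).

-- ===== PORT A =====
def get_community_target_idx (community_structure : List (List Int)) (community_target : List Int) : Int :=
  -- max_count = 0; max_list_idx = 0; for i, lst in enumerate(...): count = sum(...); if count > max_count: update
  let r := (PySem.List.enumerate community_structure 0).foldl
    (fun (st : Int × Int) p =>
      let count : Int := (p.2.map (fun x => if community_target.contains x then (1:Int) else 0)).sum
      if st.1 < count then (count, p.1) else st)
    (0, 0)
  r.2

-- ===== PORT B =====
-- posting.setdefault(x, []).append(i) sets posting[x] to posting.get(x, []) + [i]: Dict.modify (exact).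
-- counts is filled iterating over set(community_target); only its value multiset / key set are
-- consumed afterwards (max over values, min over keys), so the set's iteration order cannot matter.
def get_community_target_idx_alt (community_structure : List (List Int)) (community_target : List Int) : Int :=
  let posting : PySem.Dict Int (List Int) :=
    (PySem.List.enumerate community_structure 0).foldl
      (fun d p => p.2.foldl (fun d x => d.modify x [] (fun l => l ++ [p.1])) d)
      PySem.Dict.empty
  let counts : PySem.Dict Int Int :=
    (PySem.Set.ofList community_target).foldl
      (fun c node => (posting.getD node []).foldl (fun c i => c.insert i (c.getD i 0 + 1)) c)
      PySem.Dict.empty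
  if counts.size == 0 then 0
  else
    match PySem.List.max? counts.values (fun v => v) with
    | none => 0
    | some best =>
      match PySem.List.min? ((counts.items.filter (fun p => p.2 == best)).map (fun p => p.1)) (fun i => i) with
      | none => 0
      | some m => m

-- ===== PRECONDITION & SPEC =====
def Spec_get_community_target_idx (community_structure : List (List Int)) (community_target : List Int) (out : Int) : Prop := out = get_community_target_idx_alt community_structure community_target
instance (community_structure : List (List Int)) (community_target : List Int) (out : Int) : Decidable (Spec_get_community_target_idx community_structure community_target out) := by unfold Spec_get_community_target_idx; infer_instance

-- ===== CLAIM (what is proved, stated in full; the proofs are below) =====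
def Claim_equal_get_community_target_idx : Prop := ∀ (community_structure : List (List Int)) (community_target : List Int), Dom_get_community_target_idx community_structure community_target → Spec_get_community_target_idx community_structure community_target (get_community_target_idx community_structure community_target)

-- ===== LEMMAS AND PROOFS =====

-- A's per-community overlap count, and its Nat form
def pvCnt (ct lst : List Int) : Int :=
  (lst.map (fun x => if ct.contains x then (1:Int) else 0)).sum

def pvCntN (ct lst : List Int) : Nat := lst.countP (fun x => ct.contains x)

lemma pvCnt_eq (ct lst : List Int) : pvCnt ct lst = (pvCntN ct lst : Int) :=
  PySem.List.sum_map_ite_one_zero _ _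

-- A's loop body
def pvStepA (ct : List Int) (st : Int × Int) (p : Int × List Int) : Int × Int :=
  let count : Int := (p.2.map (fun x => if ct.contains x then (1:Int) else 0)).sum
  if st.1 < count then (count, p.1) else st

-- B's flattened (node, community-index) pair list, and the multiset the counter counts
def pvL (cs : List (List Int)) : List (Int × Int) :=
  (PySem.List.enumerate cs 0).flatMap (fun p => p.2.map (fun y => (y, p.1)))

def pvM (cs : List (List Int)) (ct : List Int) : List Int :=
  (PySem.Set.ofList ct).flatMap
    (fun t => ((pvL cs).filter (fun q => q.1 == t)).map (fun q => q.2))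

lemma pv_posting_getD (cs : List (List Int)) (t : Int) :
    ((PySem.List.enumerate cs 0).foldl
      (fun d p => p.2.foldl (fun d x => d.modify x [] (fun l => l ++ [p.1])) d)
      PySem.Dict.empty).getD t []
    = ((pvL cs).filter (fun q => q.1 == t)).map (fun q => q.2) := by
  have h2 : (PySem.List.enumerate cs 0).foldl
      (fun d p => p.2.foldl (fun d x => d.modify x [] (fun l => l ++ [p.1])) d)
      PySem.Dict.empty
      = (pvL cs).foldl (fun d q => d.modify q.1 [] (fun l => l ++ [q.2])) PySem.Dict.empty := by
    rw [pvL, List.foldl_flatMap]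
    have : (fun (d : PySem.Dict Int (List Int)) (p : Int × List Int) =>
        p.2.foldl (fun d x => d.modify x [] (fun l => l ++ [p.1])) d)
        = (fun d p => (p.2.map (fun y => (y, p.1))).foldl
            (fun d q => d.modify q.1 [] (fun l => l ++ [q.2])) d) := by
      funext d p; rw [List.foldl_map]
    rw [this]
  rw [h2, PySem.Dict.getD_foldl_modify_append]
  simp [PySem.Dict.getD_empty]

lemma pv_counts (cs : List (List Int)) (ct : List Int) :
    (PySem.Set.ofList ct).foldl
      (fun c node => (((PySem.List.enumerate cs 0).foldl
          (fun d p => p.2.foldl (fun d x => d.modify x [] (fun l => l ++ [p.1])) d)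
          PySem.Dict.empty).getD node []).foldl
        (fun c i => c.insert i (c.getD i 0 + 1)) c)
      PySem.Dict.empty
    = PySem.Dict.counter (pvM cs ct) := by
  rw [← PySem.Dict.foldl_insert_getD_add_one_eq_counter, pvM, List.foldl_flatMap]
  congr 1
  funext c node
  rw [pv_posting_getD]

-- sum of a 0/1 equality indicator over a list is the count
lemma pv_sum_indicator (x : Int) (S : List Int) :
    (S.map (fun t => if (x == t) = true then 1 else 0)).sum = S.count x := by
  induction S with
  | nil => simp
  | cons s S ihS =>
    rw [List.map_cons, List.sum_cons, ihS, List.count_cons]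
    by_cases h : x = s
    · rw [if_pos (by simp [h]), if_pos (by simp [h])]
      omega
    · rw [if_neg (by simp [beq_iff_eq]; exact h),
          if_neg (by simp [beq_iff_eq]; exact fun e => h e.symm)]
      omega

-- Σ over a duplicate-free list of per-key countP's collapses to one countP with a membership test
lemma pv_sum_swap (S : List Int) (hS : S.Nodup) (l : List (Int × Int)) (p : Int × Int → Bool) :
    (S.map (fun t => l.countP (fun q => p q && (q.1 == t)))).sum
    = l.countP (fun q => p q && S.contains q.1) := by
  induction l with
  | nil => simp
  | cons q l ih =>
    simp only [List.countP_cons]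
    rw [List.sum_map_add, ih]
    congr 1
    by_cases hp : p q
    · simp only [hp, Bool.true_and]
      rw [pv_sum_indicator]
      by_cases hm : q.1 ∈ S
      · rw [List.count_eq_one_of_mem hS hm]
        simp [hm]
      · rw [List.count_eq_zero.mpr hm]
        simp [hm]
    · simp [hp]

lemma pv_count_M (cs : List (List Int)) (ct : List Int) (i : Int) :
    (pvM cs ct).count i
    = ((PySem.List.enumerate cs 0).map (fun p => if p.1 = i then pvCntN ct p.2 else 0)).sum := by
  rw [pvM, List.count_flatMap]
  have hinner : ∀ t : Int,
      (List.count i (((pvL cs).filter (fun q => q.1 == t)).map (fun q => q.2)))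
      = (pvL cs).countP (fun q => (q.2 == i) && (q.1 == t)) := by
    intro t
    rw [List.count_eq_countP, List.countP_map, List.countP_filter]
    rfl
  simp only [Function.comp_def, hinner]
  rw [pv_sum_swap _ (PySem.Set.nodup_ofList ct)]
  have hcontains : ∀ x : Int, List.contains (PySem.Set.ofList ct) x = List.contains ct x := by
    intro x
    rw [List.contains_eq_mem, List.contains_eq_mem]
    simp [PySem.Set.mem_ofList]
  simp only [hcontains]
  rw [pvL, List.countP_flatMap]
  congr 1
  apply List.map_congr_left
  intro p _
  simp only [Function.comp_def, List.countP_map]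
  by_cases hpi : p.1 = i
  · simp only [hpi]
    unfold pvCntN
    apply List.countP_congr
    intro y _
    simp
  · rw [if_neg hpi]
    apply List.countP_eq_zero.mpr
    intro y _
    simp only [Bool.and_eq_true, beq_iff_eq, not_and]
    exact fun h _ => hpi h

-- in a list with strictly increasing indices, the ite-sum picks out the unique matching entry
lemma pv_sum_single (F : List Int → Nat) :
    ∀ (l : List (Int × List Int)), l.Pairwise (fun p q => p.1 < q.1) → ∀ p0 ∈ l,
    (l.map (fun p => if p.1 = p0.1 then F p.2 else 0)).sum = F p0.2 := by
  intro l
  induction l with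
  | nil => intro _ p0 h; simp at h
  | cons h t ih =>
    intro hpw p0 hmem
    have hlt : ∀ q ∈ t, h.1 < q.1 := (List.pairwise_cons.mp hpw).1
    have hpwt := (List.pairwise_cons.mp hpw).2
    rcases List.mem_cons.mp hmem with rfl | hmt
    · rw [List.map_cons, List.sum_cons, if_pos rfl]
      have hz : ∀ q ∈ t, (if q.1 = p0.1 then F q.2 else 0) = 0 := by
        intro q hq
        have := hlt q hq
        rw [if_neg (by omega)]
      rw [List.sum_eq_zero_iff_forall_eq_nat.mpr (by
        intro x hx
        rcases List.mem_map.mp hx with ⟨q, hq, rfl⟩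
        exact hz q hq)]
      omega
    · have hne : h.1 ≠ p0.1 := by have := hlt p0 hmt; omega
      rw [List.map_cons, List.sum_cons, if_neg hne, ih hpwt p0 hmt]
      omega

-- the counter's count at an enumerate point is exactly A's count of that community
lemma pv_count_M_at (cs : List (List Int)) (ct : List Int) (p0 : Int × List Int)
    (h : p0 ∈ PySem.List.enumerate cs 0) :
    (pvM cs ct).count p0.1 = pvCntN ct p0.2 := by
  rw [pv_count_M]
  exact pv_sum_single (pvCntN ct) _ (PySem.List.pairwise_lt_enumerate cs 0) p0 h

-- every element of the counted multiset is an index produced by enumerate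
lemma pv_mem_M (cs : List (List Int)) (ct : List Int) (i : Int) (h : i ∈ pvM cs ct) :
    ∃ p ∈ PySem.List.enumerate cs 0, p.1 = i := by
  rw [pvM] at h
  rcases List.mem_flatMap.mp h with ⟨t, _, hmem⟩
  rcases List.mem_map.mp hmem with ⟨q, hq, rfl⟩
  have hql : q ∈ pvL cs := (List.mem_filter.mp hq).1
  rw [pvL] at hql
  rcases List.mem_flatMap.mp hql with ⟨p, hp, hqp⟩
  rcases List.mem_map.mp hqp with ⟨y, _, rfl⟩
  exact ⟨p, hp, rfl⟩

-- invariant of A's fold: the result is the maximum count together with its first index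
lemma pv_A_fold (ct : List Int) (el : List (Int × List Int)) :
    ∀ mc mi : Int, 0 ≤ mc → el.Pairwise (fun p q => p.1 < q.1) →
    mc ≤ (el.foldl (pvStepA ct) (mc, mi)).1 ∧
    (∀ p ∈ el, pvCnt ct p.2 ≤ (el.foldl (pvStepA ct) (mc, mi)).1) ∧
    (el.foldl (pvStepA ct) (mc, mi) = (mc, mi) ∨
      ∃ p ∈ el, p.1 = (el.foldl (pvStepA ct) (mc, mi)).2 ∧
        pvCnt ct p.2 = (el.foldl (pvStepA ct) (mc, mi)).1 ∧
        mc < (el.foldl (pvStepA ct) (mc, mi)).1) ∧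
    (∀ p ∈ el, pvCnt ct p.2 = (el.foldl (pvStepA ct) (mc, mi)).1 →
      mc < (el.foldl (pvStepA ct) (mc, mi)).1 →
      (el.foldl (pvStepA ct) (mc, mi)).2 ≤ p.1) := by
  induction el with
  | nil =>
    intro mc mi _ _
    refine ⟨le_refl _, by simp, Or.inl rfl, by simp⟩
  | cons p el ih =>
    intro mc mi h0 hpw
    have hlt : ∀ q ∈ el, p.1 < q.1 := (List.pairwise_cons.mp hpw).1
    have hpwt := (List.pairwise_cons.mp hpw).2
    simp only [List.foldl_cons]
    by_cases hc : mc < pvCnt ct p.2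
    · have hstep : pvStepA ct (mc, mi) p = (pvCnt ct p.2, p.1) := by
        show (if mc < pvCnt ct p.2 then (pvCnt ct p.2, p.1) else (mc, mi)) = _
        rw [if_pos hc]
      rw [hstep]
      obtain ⟨h1, h2, h3, h4⟩ := ih (pvCnt ct p.2) p.1 (by omega) hpwt
      refine ⟨by omega, ?_, ?_, ?_⟩
      · intro q hq
        rcases List.mem_cons.mp hq with rfl | hq'
        · exact h1
        · exact h2 q hq'
      · rcases h3 with he | ⟨q, hq, hq1, hq2, hq3⟩
        · exact Or.inr ⟨p, List.mem_cons_self .., by rw [he], by rw [he], by rw [he]; exact hc⟩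
        · exact Or.inr ⟨q, List.mem_cons_of_mem _ hq, hq1, hq2, by omega⟩
      · intro q hq hqe hmc
        rcases List.mem_cons.mp hq with rfl | hq'
        · rcases h3 with he | ⟨r, _, _, _, hr3⟩
          · rw [he]
          · omega
        · rcases h3 with he | _
          · rw [he]; exact le_of_lt (hlt q hq')
          · exact h4 q hq' hqe (by omega)
    · have hstep : pvStepA ct (mc, mi) p = (mc, mi) := by
        show (if mc < pvCnt ct p.2 then (pvCnt ct p.2, p.1) else (mc, mi)) = _
        rw [if_neg hc]
      rw [hstep]
      obtain ⟨h1, h2, h3, h4⟩ := ih mc mi h0 hpwt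
      refine ⟨h1, ?_, ?_, ?_⟩
      · intro q hq
        rcases List.mem_cons.mp hq with rfl | hq'
        · omega
        · exact h2 q hq'
      · rcases h3 with he | ⟨q, hq, hq1, hq2, hq3⟩
        · exact Or.inl he
        · exact Or.inr ⟨q, List.mem_cons_of_mem _ hq, hq1, hq2, hq3⟩
      · intro q hq hqe hmc
        rcases List.mem_cons.mp hq with rfl | hq'
        · omega
        · exact h4 q hq' hqe hmc

lemma pv_ofList_ne_nil {xs : List Int} (h : xs ≠ []) : PySem.Set.ofList xs ≠ [] := by
  intro he
  cases xs with
  | nil => exact h rfl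
  | cons a t =>
    have : a ∈ PySem.Set.ofList (a :: t) := (PySem.Set.mem_ofList _ _).mpr (by simp)
    rw [he] at this
    simp at this

-- ===== VERDICT (by name: the statement is the Claim_ definition above) =====
theorem get_community_target_idx_spec : Claim_equal_get_community_target_idx := by
  intro cs ct _
  unfold Spec_get_community_target_idx get_community_target_idx get_community_target_idx_alt
  simp only []
  rw [pv_counts]
  set M := pvM cs ct with hM
  set R := (PySem.List.enumerate cs 0).foldl (pvStepA ct) ((0:Int), (0:Int)) with hR
  change R.2 = _
  obtain ⟨ha1, ha2, ha3, ha4⟩ :=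
    pv_A_fold ct (PySem.List.enumerate cs 0) 0 0 (le_refl 0) (PySem.List.pairwise_lt_enumerate cs 0)
  rw [← hR] at ha1 ha2 ha3 ha4
  by_cases hMe : M = []
  · -- no overlap anywhere: counter is empty, A's max never moved
    have hR1 : R.1 = 0 := by
      rcases ha3 with he | ⟨p, hp, _, hpc, hlt⟩
      · rw [he]
      · exfalso
        have hcnt : (M.count p.1 : Int) = R.1 := by
          rw [hM, pv_count_M_at cs ct p hp, ← pvCnt_eq, hpc]
        rw [hMe] at hcnt
        simp at hcnt
        omega
    have hR2 : R = (0, 0) := by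
      rcases ha3 with he | ⟨_, _, _, _, hlt⟩
      · exact he
      · omega
    rw [hMe, hR2]
    rfl
  · -- some community overlaps the target
    have hKne : PySem.Set.ofList M ≠ [] := pv_ofList_ne_nil hMe
    have hsize : (PySem.Dict.counter M).size ≠ 0 := by
      have : (PySem.Dict.counter M).items = (PySem.Set.ofList M).map (fun k => (k, (M.count k : Int))) :=
        PySem.Dict.items_counter M
      simp only [PySem.Dict.size, this, List.length_map]
      intro h0
      exact hKne (List.eq_nil_of_length_eq_zero h0)
    rw [if_neg (by simp only [beq_iff_eq]; exact hsize)]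
    -- counts per key are A's per-community counts
    have hcount_le : ∀ k ∈ M, (M.count k : Int) ≤ R.1 := by
      intro k hk
      rcases pv_mem_M cs ct k (hM ▸ hk) with ⟨p, hp, rfl⟩
      rw [hM, pv_count_M_at cs ct p hp, ← pvCnt_eq]
      exact ha2 p hp
    have hR1pos : 0 < R.1 := by
      rcases List.exists_mem_of_ne_nil M hMe with ⟨i, hi⟩
      rcases pv_mem_M cs ct i (hM ▸ hi) with ⟨p, hp, rfl⟩
      have h1 : 0 < M.count p.1 := List.count_pos_iff.mpr hi
      have h2 : (M.count p.1 : Int) = pvCnt ct p.2 := by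
        rw [hM, pv_count_M_at cs ct p hp, pvCnt_eq]
      have := ha2 p hp
      omega
    rcases ha3 with he | ⟨pR, hpR, hpR1, hpR2, -⟩
    · rw [he] at hR1pos
      simp at hR1pos
    have hR2M : R.2 ∈ M := by
      rw [← hpR1]
      apply List.count_pos_iff.mp
      have : (M.count pR.1 : Int) = R.1 := by
        rw [hM, pv_count_M_at cs ct pR hpR, ← pvCnt_eq, hpR2]
      omega
    -- values and items of the counter
    have hitems : (PySem.Dict.counter M).items = (PySem.Set.ofList M).map (fun k => (k, (M.count k : Int))) :=
      PySem.Dict.items_counter M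
    have hvalues : (PySem.Dict.counter M).values = (PySem.Set.ofList M).map (fun k => (M.count k : Int)) := by
      show ((PySem.Dict.counter M).items).map (fun p => p.2) = _
      rw [hitems, List.map_map]
      rfl
    -- max over the values is R.1
    rcases hbm : PySem.List.max? (PySem.Dict.counter M).values (fun v => v) with _ | best
    · exfalso
      rw [PySem.List.max?_eq_none_iff, hvalues] at hbm
      exact hKne (List.map_eq_nil_iff.mp hbm)
    have hbest_mem := PySem.List.max?_mem hbm
    have hbest_max := PySem.List.max?_isMax hbm
    have hbest_le : best ≤ R.1 := by
      rw [hvalues] at hbest_mem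
      rcases List.mem_map.mp hbest_mem with ⟨k, hk, rfl⟩
      exact hcount_le k ((PySem.Set.mem_ofList _ _).mp hk)
    have hR1_mem : (M.count R.2 : Int) ∈ (PySem.Dict.counter M).values := by
      rw [hvalues]
      exact List.mem_map.mpr ⟨R.2, (PySem.Set.mem_ofList _ _).mpr hR2M, rfl⟩
    have hcntR2 : (M.count R.2 : Int) = R.1 := by
      rw [← hpR1, hM, pv_count_M_at cs ct pR hpR, ← pvCnt_eq, hpR2]
    have hbest : best = R.1 := by
      have := hbest_max _ hR1_mem
      simp only [hcntR2] at this
      omega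
    -- min over the keys attaining best is R.2
    have hR2cand : R.2 ∈ ((PySem.Dict.counter M).items.filter (fun p => p.2 == best)).map (fun p => p.1) := by
      apply List.mem_map.mpr
      refine ⟨(R.2, (M.count R.2 : Int)), ?_, rfl⟩
      apply List.mem_filter.mpr
      constructor
      · rw [hitems]
        exact List.mem_map.mpr ⟨R.2, (PySem.Set.mem_ofList _ _).mpr hR2M, rfl⟩
      · simp [hcntR2, hbest]
    split
    · rename_i habs
      simp at habs
    rename_i b2 hb2
    have hb2e : best = b2 := by injection hb2
    subst hb2e
    split
    · rename_i hmm
      exfalso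
      rw [PySem.List.min?_eq_none_iff] at hmm
      rw [hmm] at hR2cand
      simp at hR2cand
    rename_i m hmm
    have hm_le : m ≤ R.2 := PySem.List.min?_isMin hmm _ hR2cand
    have hm_mem := PySem.List.min?_mem hmm
    rcases List.mem_map.mp hm_mem with ⟨q, hq, rfl⟩
    have hq1 := (List.mem_filter.mp hq).1
    have hq2 := (List.mem_filter.mp hq).2
    rw [hitems] at hq1
    rcases List.mem_map.mp hq1 with ⟨k, hk, rfl⟩
    simp only [beq_iff_eq] at hq2
    -- k is a real index with count best = R.1, so A's first-max index is ≤ k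
    rcases pv_mem_M cs ct k ((PySem.Set.mem_ofList _ _).mp hk) with ⟨p, hp, hpk⟩
    have h5 : (M.count p.1 : Int) = pvCnt ct p.2 := by
      rw [hM, pv_count_M_at cs ct p hp, ← pvCnt_eq]
    have hcntk : pvCnt ct p.2 = R.1 := by
      rw [← h5, hpk, hq2, hbest]
    have hR2_le : R.2 ≤ p.1 := ha4 p hp hcntk hR1pos
    simp only at hm_le hq2 ⊢
    omega
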